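-- pv_equiv track=rewrite | github.com/IBM/transition-amr-parser | scripts/jamr2isi.py | get_all_vars
-- ===== SOURCE A (Python) =====
-- def get_all_vars(penman_str):
--     in_quotes = False
--     all_vars = []
--     for (i,ch) in enumerate(penman_str):
--         if ch == '"':
--             if in_quotes:
--                 in_quotes = False
--             else:
--                 in_quotes = True
--         if in_quotes:
--             continue
--         if ch == '(':
--             var = ''
--             j = i+1
--             while j < len(penman_str) and penman_str[j] not in [' ','\n']:
--                 var += penman_str[j]
--                 j += 1
--             all_vars.append(var)
--     return all_vars
-- ===== SOURCE B (Python) =====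
-- def get_all_vars(penman_str):
--     # Alternative single-pass strategy: every '(' outside quotes opens a growing buffer;
--     # a space/newline flushes all open buffers at once (no index lookahead).
--     in_quotes = False
--     active = []
--     out = []
--     for ch in penman_str:
--         if ch == '"':
--             in_quotes = not in_quotes
--         if ch in (' ', '\n'):
--             out.extend(active)
--             active = []
--         else:
--             active = [v + ch for v in active]
--             if ch == '(' and not in_quotes:
--                 active.append('')
--     out.extend(active)
--     return out
-- ===== Notes on version B (the rewrite author's own statement) =====
-- stated objective: alternative
-- what changed: B makes one left-to-right pass maintaining the set of currently-open variable buffers (opened at each unquoted '(', all flushed at a space/newline), instead of A's per-'(' lookahead rescan of the suffix.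
import Mathlib
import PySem

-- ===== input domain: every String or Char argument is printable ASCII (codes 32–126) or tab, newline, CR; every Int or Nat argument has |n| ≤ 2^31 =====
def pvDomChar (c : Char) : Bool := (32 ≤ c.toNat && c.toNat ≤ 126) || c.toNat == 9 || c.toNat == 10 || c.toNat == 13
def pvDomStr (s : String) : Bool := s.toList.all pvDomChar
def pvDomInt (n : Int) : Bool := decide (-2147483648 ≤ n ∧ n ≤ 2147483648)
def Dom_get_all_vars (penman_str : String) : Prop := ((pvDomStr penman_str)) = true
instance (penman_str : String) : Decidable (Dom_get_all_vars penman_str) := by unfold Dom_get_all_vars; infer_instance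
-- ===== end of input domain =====

-- B replaces A's per-'(' forward rescan by a single pass that keeps all currently-open
-- variable buffers and flushes them at each space/newline (objective: alternative; same cost).


-- ===== PORT A =====
-- inner `while j < len and penman_str[j] not in [' ','\n']: var += penman_str[j]; j += 1`,
-- rendered as structural recursion on the remaining suffix (one step per j increment)
def collectA (cs : List Char) (var : String) : String :=
  match cs with
  | [] => var
  | c :: rest => if c == ' ' || c == '\n' then var else collectA rest (var.push c)

-- outer `for (i,ch) in enumerate(...)` loop: one recursive step per character, state
-- (in_quotes, all_vars) as in the Python; `penman_str[i+1:]` is the suffix `rest`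
def getAllVarsA (cs : List Char) (in_quotes : Bool) (all_vars : List String) : List String :=
  match cs with
  | [] => all_vars
  | ch :: rest =>
    let in_quotes := if ch == '"' then !in_quotes else in_quotes
    if in_quotes then getAllVarsA rest in_quotes all_vars   -- `continue`
    else if ch == '(' then getAllVarsA rest in_quotes (all_vars ++ [collectA rest ""])
    else getAllVarsA rest in_quotes all_vars

def get_all_vars (penman_str : String) : List String :=
  getAllVarsA penman_str.toList false []

-- ===== PORT B =====
-- one fold step of B's `for ch in penman_str`, state (in_quotes, active, out)
def stepB (st : Bool × List String × List String) (ch : Char) : Bool × List String × List String :=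
  let (in_quotes, active, out) := st
  let in_quotes := if ch == '"' then !in_quotes else in_quotes
  if ch == ' ' || ch == '\n' then (in_quotes, [], out ++ active)
  else
    let active := active.map (fun v => v.push ch)
    let active := if ch == '(' && !in_quotes then active ++ [""] else active
    (in_quotes, active, out)

def get_all_vars_alt (penman_str : String) : List String :=
  let st := penman_str.toList.foldl stepB (false, [], [])
  st.2.2 ++ st.2.1

-- ===== PRECONDITION & SPEC =====
def Spec_get_all_vars (penman_str : String) (out : List String) : Prop := out = get_all_vars_alt penman_str
instance (penman_str : String) (out : List String) : Decidable (Spec_get_all_vars penman_str out) := by unfold Spec_get_all_vars; infer_instance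

-- ===== CLAIM (what is proved, stated in full; the proofs are below) =====
def Claim_equal_get_all_vars : Prop := ∀ (penman_str : String), Dom_get_all_vars penman_str → Spec_get_all_vars penman_str (get_all_vars penman_str)

-- ===== LEMMAS AND PROOFS =====
theorem getAllVarsA_acc (cs : List Char) (inq : Bool) (acc : List String) :
    getAllVarsA cs inq acc = acc ++ getAllVarsA cs inq [] := by
  induction cs generalizing inq acc with
  | nil => simp [getAllVarsA]
  | cons ch rest ih =>
    simp only [getAllVarsA]
    cases hq : (if ch == '"' then !inq else inq)
    · by_cases hp : (ch == '(') = true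
      · simp only [Bool.false_eq_true, if_false, hp, if_true]
        rw [ih _ (acc ++ _), ih _ ([] ++ _)]; simp
      · simp only [Bool.false_eq_true, if_false, hp]
        exact ih _ _
    · simpa using ih _ _

theorem main_lemma (cs : List Char) (inq : Bool) (active out : List String) :
    (cs.foldl stepB (inq, active, out)).2.2 ++ (cs.foldl stepB (inq, active, out)).2.1
    = out ++ active.map (fun v => collectA cs v) ++ getAllVarsA cs inq [] := by
  induction cs generalizing inq active out with
  | nil => simp [getAllVarsA, collectA]
  | cons ch rest ih =>
    simp only [List.foldl_cons, stepB]
    by_cases hsp : (ch == ' ' || ch == '\n') = true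
    · have hch : ch = ' ' ∨ ch = '\n' := by simpa using hsp
      have hq : (ch == '"') = false := by rcases hch with h | h <;> subst h <;> decide
      have hp : (ch == '(') = false := by rcases hch with h | h <;> subst h <;> decide
      have hcv : ∀ v : String, collectA (ch :: rest) v = v := fun v => by
        simp [collectA, hsp]
      simp only [hq, hsp, if_true, Bool.false_eq_true, if_false, getAllVarsA, hp, ih]
      simp [hcv]
    · have hcol : ∀ v : String, collectA (ch :: rest) v = collectA rest (v.push ch) :=
        fun v => by simp [collectA, hsp]
      by_cases hq : (ch == '"') = true
      · have hc : ch = '"' := by simpa using hq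
        subst hc
        simp only [getAllVarsA, hq, if_true, hsp, Bool.false_eq_true, if_false]
        cases inq
        · simp only [Bool.not_false, if_true, Bool.and_false, show (('"' : Char) == '(') = false from rfl, Bool.false_and]
          simp [ih, hcol, List.map_map, Function.comp_def]
        · simp only [Bool.not_true, Bool.and_true, show (('"' : Char) == '(') = false from rfl, Bool.false_and, Bool.false_eq_true, if_false]
          simp [ih, hcol, List.map_map, Function.comp_def]
      · have hq' : (ch == '"') = false := by simpa using hq
        simp only [getAllVarsA, hq', Bool.false_eq_true, if_false, hsp]
        cases inq
        · by_cases hp : (ch == '(') = true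
          · simp only [hp, Bool.not_false, Bool.and_true, if_true]
            simp only [List.nil_append, Bool.false_eq_true, if_false]
            rw [getAllVarsA_acc rest false [collectA rest ""]]
            simp [ih, hcol, List.map_map, Function.comp_def]
          · have hp' : (ch == '(') = false := by simpa using hp
            simp only [hp', Bool.false_and, Bool.false_eq_true, if_false, Bool.not_false, Bool.and_true]
            simp [ih, hcol, List.map_map, Function.comp_def]
        · simp only [Bool.not_true, Bool.and_false, Bool.false_eq_true, if_false, if_true]
          simp [ih, hcol, List.map_map, Function.comp_def]

-- ===== VERDICT (by name: the statement is the Claim_ definition above) =====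
theorem get_all_vars_spec : Claim_equal_get_all_vars := by
  intro s _
  unfold Spec_get_all_vars get_all_vars get_all_vars_alt
  simp only []
  rw [main_lemma]
  simp
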